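-- pv_equiv track=rewrite | github.com/jrudyg/CIP | frontend/pages/2_Contracts_Portfolio.py | get_filter_options
-- ===== SOURCE A (Python) =====
-- from typing import Dict, List
--
-- def get_filter_options(contracts: List[Dict]) -> Dict:
--     """Extract unique filter options from contracts."""
--     statuses, risks, roles, parties, types = set(), set(), set(), set(), set()
--     for c in contracts:
--         if c.get("status"): statuses.add(c["status"])
--         if c.get("risk_level"): risks.add(c["risk_level"].upper())
--         if c.get("party_relationship"): roles.add(c["party_relationship"])
--         if c.get("counterparty"): parties.add(c["counterparty"])
--         if c.get("contract_type"): types.add(c["contract_type"])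
--     return {
--         "statuses": ["All"] + sorted(list(statuses)),
--         "risks": ["All"] + sorted(list(risks)),
--         "roles": ["All"] + sorted(list(roles)) if roles else ["All", "Customer", "Vendor"],
--         "parties": ["All"] + sorted(list(parties)),
--         "types": ["All"] + sorted(list(types)),
--     }
-- ===== SOURCE B (Python) =====
-- def get_filter_options(contracts):
--     """Extract unique filter options from contracts.
--
--     Different strategy from the original: no sets and no final sort call.
--     Each field's options are kept as a sorted, duplicate-free list that is
--     built online by ordered insertion while scanning the contracts.
--     """
--     def field(key, upper=False):
--         out = []  # sorted, duplicate-free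
--         for c in contracts:
--             v = c.get(key)
--             if not v:
--                 continue
--             if upper:
--                 v = v.upper()
--             i = 0
--             while i < len(out) and out[i] < v:
--                 i += 1
--             if i == len(out) or out[i] != v:
--                 out.insert(i, v)
--         return out
--
--     roles = field("party_relationship")
--     return {
--         "statuses": ["All"] + field("status"),
--         "risks": ["All"] + field("risk_level", True),
--         "roles": ["All"] + roles if roles else ["All", "Customer", "Vendor"],
--         "parties": ["All"] + field("counterparty"),
--         "types": ["All"] + field("contract_type"),
--     }
-- ===== Notes on version B (the rewrite author's own statement) =====
-- stated objective: alternative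
-- what changed: A accumulates five unordered hash sets in one fused loop and sorts each at the end; B keeps each field's options as a sorted duplicate-free list built online by ordered insertion (position search + insert) while scanning, so no sets and no sort call exist in B.
import Mathlib
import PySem

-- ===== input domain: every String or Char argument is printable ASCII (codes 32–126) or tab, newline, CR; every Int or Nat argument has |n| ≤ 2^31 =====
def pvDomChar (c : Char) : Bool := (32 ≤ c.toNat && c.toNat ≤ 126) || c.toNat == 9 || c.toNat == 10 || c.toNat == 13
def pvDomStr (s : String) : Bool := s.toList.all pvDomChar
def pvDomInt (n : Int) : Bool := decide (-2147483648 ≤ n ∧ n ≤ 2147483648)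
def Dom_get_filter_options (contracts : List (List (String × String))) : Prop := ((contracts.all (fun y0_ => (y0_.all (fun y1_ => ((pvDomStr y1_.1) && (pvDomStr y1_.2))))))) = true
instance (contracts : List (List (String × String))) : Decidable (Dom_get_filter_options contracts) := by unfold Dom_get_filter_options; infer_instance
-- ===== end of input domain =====

-- B replaces A's five hash sets + final sorts with sorted duplicate-free lists maintained by ordered insertion during the scan; objective: alternative algorithm, same observable result.

-- c.get(k): first-match association-list lookup (shared dict lookup, used by both ports)
def dictGet? (c : List (String × String)) (k : String) : Option String :=
  match c.find? (fun p => p.1 == k) with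
  | some p => some p.2
  | none => none

-- ===== PORT A =====
def get_filter_options (contracts : List (List (String × String))) : List (String × List String) :=
  let init : (PySem.Set String × PySem.Set String × PySem.Set String × PySem.Set String × PySem.Set String) :=
    (PySem.Set.empty, PySem.Set.empty, PySem.Set.empty, PySem.Set.empty, PySem.Set.empty)
  let r := contracts.foldl (fun acc c =>
    let statuses := match dictGet? c "status" with
      | some v => if v = "" then acc.1 else PySem.Set.add acc.1 v
      | none => acc.1
    let risks := match dictGet? c "risk_level" with
      | some v => if v = "" then acc.2.1 else PySem.Set.add acc.2.1 (PySem.Str.upper v)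
      | none => acc.2.1
    let roles := match dictGet? c "party_relationship" with
      | some v => if v = "" then acc.2.2.1 else PySem.Set.add acc.2.2.1 v
      | none => acc.2.2.1
    let parties := match dictGet? c "counterparty" with
      | some v => if v = "" then acc.2.2.2.1 else PySem.Set.add acc.2.2.2.1 v
      | none => acc.2.2.2.1
    let types := match dictGet? c "contract_type" with
      | some v => if v = "" then acc.2.2.2.2 else PySem.Set.add acc.2.2.2.2 v
      | none => acc.2.2.2.2
    (statuses, risks, roles, parties, types)) init
  [("statuses", "All" :: PySem.List.sorted r.1 (fun x => x) false),
   ("risks", "All" :: PySem.List.sorted r.2.1 (fun x => x) false),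
   ("roles", if r.2.2.1 ≠ [] then "All" :: PySem.List.sorted r.2.2.1 (fun x => x) false
             else ["All", "Customer", "Vendor"]),
   ("parties", "All" :: PySem.List.sorted r.2.2.2.1 (fun x => x) false),
   ("types", "All" :: PySem.List.sorted r.2.2.2.2 (fun x => x) false)]

-- ===== PORT B =====
-- B's position search + insert into a sorted duplicate-free list, as the obvious structural recursion
def insSorted (x : String) : List String → List String
  | [] => [x]
  | y :: ys => if y < x then y :: insSorted x ys
               else if y ≠ x then x :: y :: ys
               else y :: ys

-- one field's options: scan the contracts once, ordered-inserting each truthy (transformed) value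
def fieldSortedB (contracts : List (List (String × String))) (key : String) (f : String → String) : List String :=
  contracts.foldl (fun out c =>
    match dictGet? c key with
    | some v => if v = "" then out else insSorted (f v) out
    | none => out) []

def get_filter_options_alt (contracts : List (List (String × String))) : List (String × List String) :=
  let roles := fieldSortedB contracts "party_relationship" (fun v => v)
  [("statuses", "All" :: fieldSortedB contracts "status" (fun v => v)),
   ("risks", "All" :: fieldSortedB contracts "risk_level" PySem.Str.upper),
   ("roles", if roles ≠ [] then "All" :: roles else ["All", "Customer", "Vendor"]),
   ("parties", "All" :: fieldSortedB contracts "counterparty" (fun v => v)),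
   ("types", "All" :: fieldSortedB contracts "contract_type" (fun v => v))]

-- ===== PRECONDITION & SPEC =====
def Spec_get_filter_options (contracts : List (List (String × String))) (out : List (String × List String)) : Prop := out = get_filter_options_alt contracts
instance (contracts : List (List (String × String))) (out : List (String × List String)) : Decidable (Spec_get_filter_options contracts out) := by unfold Spec_get_filter_options; infer_instance

-- ===== CLAIM (what is proved, stated in full; the proofs are below) =====
def Claim_equal_get_filter_options : Prop := ∀ (contracts : List (List (String × String))), Dom_get_filter_options contracts → Spec_get_filter_options contracts (get_filter_options contracts)

-- ===== LEMMAS AND PROOFS =====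

-- A-side per-field step on a set
def setStep (key : String) (f : String → String) (s : PySem.Set String) (c : List (String × String)) : PySem.Set String :=
  match dictGet? c key with
  | some v => if v = "" then s else PySem.Set.add s (f v)
  | none => s

-- B-side per-field step on a sorted list
def insStep (key : String) (f : String → String) (out : List String) (c : List (String × String)) : List String :=
  match dictGet? c key with
  | some v => if v = "" then out else insSorted (f v) out
  | none => out

theorem insSorted_cons (x y : String) (ys : List String) :
    insSorted x (y :: ys) = if y < x then y :: insSorted x ys
                            else if y ≠ x then x :: y :: ys else y :: ys := rfl

theorem mem_insSorted (z x : String) (l : List String) :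
    z ∈ insSorted x l ↔ z = x ∨ z ∈ l := by
  induction l with
  | nil => simp [insSorted]
  | cons y ys ih =>
    by_cases hlt : y < x
    · rw [insSorted_cons, if_pos hlt]
      simp only [List.mem_cons, ih]
      tauto
    · by_cases hne : y ≠ x
      · rw [insSorted_cons, if_neg hlt, if_pos hne]
        simp [List.mem_cons]
      · rw [Classical.not_not] at hne
        subst hne
        rw [insSorted_cons, if_neg hlt, if_neg (by simp)]
        simp only [List.mem_cons]
        tauto

theorem ins_pairwise (x : String) (l : List String) (h : l.Pairwise (· < ·)) :
    (insSorted x l).Pairwise (· < ·) := by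
  induction l with
  | nil => simp [insSorted]
  | cons y ys ih =>
    rcases List.pairwise_cons.mp h with ⟨hy, hys⟩
    by_cases hlt : y < x
    · rw [insSorted_cons, if_pos hlt]
      refine List.pairwise_cons.mpr ⟨?_, ih hys⟩
      intro z hz
      rcases (mem_insSorted z x ys).mp hz with rfl | hzys
      · exact hlt
      · exact hy z hzys
    · by_cases hne : y ≠ x
      · rw [insSorted_cons, if_neg hlt, if_pos hne]
        refine List.pairwise_cons.mpr ⟨?_, h⟩
        intro z hz
        rcases List.mem_cons.mp hz with rfl | hzys
        · exact lt_of_le_of_ne (not_lt.mp hlt) (Ne.symm hne)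
        · exact lt_trans (lt_of_le_of_ne (not_lt.mp hlt) (Ne.symm hne)) (hy z hzys)
      · rw [insSorted_cons, if_neg hlt, if_neg hne]
        exact h

theorem insSorted_of_mem (x : String) (l : List String) (h : l.Pairwise (· < ·)) (hx : x ∈ l) :
    insSorted x l = l := by
  induction l with
  | nil => cases hx
  | cons y ys ih =>
    rcases List.pairwise_cons.mp h with ⟨hy, hys⟩
    rcases List.mem_cons.mp hx with rfl | hxs
    · rw [insSorted_cons, if_neg (lt_irrefl x), if_neg (by simp)]
    · have hlt : y < x := hy x hxs
      rw [insSorted_cons, if_pos hlt, ih hys hxs]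

theorem insSorted_perm_of_not_mem (x : String) (l : List String) (hx : x ∉ l) :
    (insSorted x l).Perm (x :: l) := by
  induction l with
  | nil => simp [insSorted]
  | cons y ys ih =>
    have hxy : x ≠ y := fun h => hx (h ▸ List.mem_cons_self)
    have hxys : x ∉ ys := fun h => hx (List.mem_cons_of_mem _ h)
    by_cases hlt : y < x
    · rw [insSorted_cons, if_pos hlt]
      exact (List.Perm.cons y (ih hxys)).trans (List.Perm.swap x y ys)
    · rw [insSorted_cons, if_neg hlt, if_pos (Ne.symm hxy)]

theorem insSorted_perm_add (x : String) (l : List String) (s : PySem.Set String)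
    (hpw : l.Pairwise (· < ·)) (hp : l.Perm s) :
    (insSorted x l).Perm (PySem.Set.add s x) := by
  by_cases hx : x ∈ s
  · have hxl : x ∈ l := hp.mem_iff.mpr hx
    rw [insSorted_of_mem x l hpw hxl,
        show PySem.Set.add s x = s by
          simp [PySem.Set.add, PySem.Set.contains_eq_listContains, hx]]
    exact hp
  · have hxl : x ∉ l := fun h => hx (hp.mem_iff.mp h)
    have h1 : (insSorted x l).Perm (x :: l) := insSorted_perm_of_not_mem x l hxl
    have h2 : PySem.Set.add s x = s ++ [x] := by
      simp [PySem.Set.add, PySem.Set.contains_eq_listContains, hx]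
    rw [h2]
    exact h1.trans ((hp.cons x).trans (List.perm_append_singleton x s).symm)

-- fold invariant: B's list stays sorted and a permutation of A's set
theorem fold_inv (key : String) (f : String → String) (cs : List (List (String × String)))
    (l : List String) (s : PySem.Set String)
    (hpw : l.Pairwise (· < ·)) (hp : l.Perm s) :
    (cs.foldl (insStep key f) l).Pairwise (· < ·) ∧
    (cs.foldl (insStep key f) l).Perm (cs.foldl (setStep key f) s) := by
  induction cs generalizing l s with
  | nil => exact ⟨hpw, hp⟩
  | cons c cs ih =>
    simp only [List.foldl_cons]
    apply ih
    · unfold insStep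
      match dictGet? c key with
      | none => exact hpw
      | some v =>
        by_cases hv : v = ""
        · simpa [hv] using hpw
        · simpa [hv] using ins_pairwise (f v) l hpw
    · unfold insStep setStep
      match dictGet? c key with
      | none => exact hp
      | some v =>
        by_cases hv : v = ""
        · simpa [hv] using hp
        · simpa [hv] using insSorted_perm_add (f v) l s hpw hp

-- B's field result names A's sorted set
theorem field_eq (key : String) (f : String → String) (cs : List (List (String × String))) :
    PySem.List.sorted (cs.foldl (setStep key f) PySem.Set.empty) (fun x => x) false
      = fieldSortedB cs key f := by
  have h := fold_inv key f cs [] PySem.Set.empty List.Pairwise.nil (by rfl)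
  exact PySem.List.sorted_eq_of_perm_of_pairwise_lt _ _ _ h.2 h.1

-- A's fused fold splits into five independent set folds
theorem fold_split (cs : List (List (String × String)))
    (s1 s2 s3 s4 s5 : PySem.Set String) :
    cs.foldl (fun acc c =>
      let statuses := match dictGet? c "status" with
        | some v => if v = "" then acc.1 else PySem.Set.add acc.1 v
        | none => acc.1
      let risks := match dictGet? c "risk_level" with
        | some v => if v = "" then acc.2.1 else PySem.Set.add acc.2.1 (PySem.Str.upper v)
        | none => acc.2.1
      let roles := match dictGet? c "party_relationship" with
        | some v => if v = "" then acc.2.2.1 else PySem.Set.add acc.2.2.1 v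
        | none => acc.2.2.1
      let parties := match dictGet? c "counterparty" with
        | some v => if v = "" then acc.2.2.2.1 else PySem.Set.add acc.2.2.2.1 v
        | none => acc.2.2.2.1
      let types := match dictGet? c "contract_type" with
        | some v => if v = "" then acc.2.2.2.2 else PySem.Set.add acc.2.2.2.2 v
        | none => acc.2.2.2.2
      (statuses, risks, roles, parties, types)) (s1, s2, s3, s4, s5)
    = (cs.foldl (setStep "status" (fun v => v)) s1,
       cs.foldl (setStep "risk_level" PySem.Str.upper) s2,
       cs.foldl (setStep "party_relationship" (fun v => v)) s3,
       cs.foldl (setStep "counterparty" (fun v => v)) s4,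
       cs.foldl (setStep "contract_type" (fun v => v)) s5) := by
  induction cs generalizing s1 s2 s3 s4 s5 with
  | nil => rfl
  | cons c cs ih =>
    simp only [List.foldl_cons]
    rw [ih]
    rfl

theorem fieldSortedB_foldl (cs : List (List (String × String))) (key : String) (f : String → String) :
    fieldSortedB cs key f = cs.foldl (insStep key f) [] := rfl

-- ===== VERDICT (by name: the statement is the Claim_ definition above) =====
theorem get_filter_options_spec : Claim_equal_get_filter_options := by
  intro contracts _
  unfold Spec_get_filter_options get_filter_options get_filter_options_alt
  simp only [fold_split]
  have hperm := (fold_inv "party_relationship" (fun v => v) contracts [] PySem.Set.empty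
      List.Pairwise.nil (by rfl)).2
  have hnil : (List.foldl (setStep "party_relationship" (fun v => v)) PySem.Set.empty contracts ≠ [])
      ↔ ((fieldSortedB contracts "party_relationship" (fun v => v)) ≠ []) := by
    rw [fieldSortedB_foldl]
    constructor
    · intro h h2; exact h ((List.Perm.nil_eq (h2 ▸ hperm)).symm)
    · intro h h2; exact h (List.Perm.eq_nil (h2 ▸ hperm))
  rw [field_eq "status" (fun v => v), field_eq "risk_level" PySem.Str.upper,
      field_eq "party_relationship" (fun v => v), field_eq "counterparty" (fun v => v),
      field_eq "contract_type" (fun v => v)]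
  simp only [hnil]
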